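-- pv_equiv track=rewrite | github.com/karaokedurrif/Seedy | dify_labels.py | parse_tags_to_fields
-- ===== SOURCE A (Python) =====
-- from typing import Dict, List, Tuple
--
-- PREFIX_TO_FIELD = {
--     "ESPECIE": "especie",
--     "TEMA": "tema",
--     "SUB": "subtipo",
--     "FUENTE": "fuente",
--     "IDIOMA": "idioma",
-- }
--
-- DEFAULT_FIELD = "etiquetas_libres"
--
-- def parse_tags_to_fields(tags: List[str]) -> Dict[str, List[str]]:
--     out: Dict[str, List[str]] = {}
--     for p in tags:
--         if ":" in p:
--             prefix, value = p.split(":", 1)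
--             field = PREFIX_TO_FIELD.get(prefix.strip().upper(), DEFAULT_FIELD)
--             out.setdefault(field, []).append(value.strip())
--         else:
--             out.setdefault(DEFAULT_FIELD, []).append(p.strip())
--     for k in list(out.keys()):
--         out[k] = sorted(set(out[k]))
--     return out
-- ===== SOURCE B (Python) =====
-- from typing import Dict, List, Tuple
--
-- PREFIX_TO_FIELD = {
--     "ESPECIE": "especie",
--     "TEMA": "tema",
--     "SUB": "subtipo",
--     "FUENTE": "fuente",
--     "IDIOMA": "idioma",
-- }
--
-- DEFAULT_FIELD = "etiquetas_libres"
--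
-- def _classify(p: str) -> Tuple[str, str]:
--     if ":" in p:
--         prefix, value = p.split(":", 1)
--         return PREFIX_TO_FIELD.get(prefix.strip().upper(), DEFAULT_FIELD), value.strip()
--     return DEFAULT_FIELD, p.strip()
--
-- def parse_tags_to_fields(tags: List[str]) -> Dict[str, List[str]]:
--     pairs = [_classify(p) for p in tags]
--     return {f: sorted({v for g, v in pairs if g == f})
--             for f in dict.fromkeys(f for f, _ in pairs)}
-- ===== Notes on version B (the rewrite author's own statement) =====
-- stated objective: alternative
-- what changed: Replaces A's incremental dict accumulation (setdefault/append per tag, then an in-place rewrite pass over the keys) with a flat classify-every-tag pass producing (field, value) pairs, followed by a dict comprehension that groups per distinct field via a set comprehension, so no dict is ever mutated.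
import Mathlib
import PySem

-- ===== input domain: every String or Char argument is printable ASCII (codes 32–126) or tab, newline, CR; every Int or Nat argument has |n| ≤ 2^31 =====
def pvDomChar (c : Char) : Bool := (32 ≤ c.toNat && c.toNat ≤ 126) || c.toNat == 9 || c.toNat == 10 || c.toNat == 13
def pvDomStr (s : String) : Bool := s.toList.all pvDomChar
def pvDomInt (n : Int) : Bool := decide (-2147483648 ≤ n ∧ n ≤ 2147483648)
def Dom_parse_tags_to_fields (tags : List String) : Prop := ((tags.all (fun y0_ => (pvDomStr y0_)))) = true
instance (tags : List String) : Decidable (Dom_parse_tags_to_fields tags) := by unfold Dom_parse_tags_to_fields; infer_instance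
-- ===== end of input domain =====

-- B replaces A's incremental setdefault/append dict accumulation with a flat classify pass
-- into (field, value) pairs followed by a per-distinct-field grouping comprehension (objective: alternative).

-- module constants shared by both programs
def pvPrefixToField : PySem.Dict String String :=
  PySem.Dict.ofList
    [("ESPECIE", "especie"), ("TEMA", "tema"), ("SUB", "subtipo"),
     ("FUENTE", "fuente"), ("IDIOMA", "idioma")]

def pvDefaultField : String := "etiquetas_libres"

-- ===== PORT A =====
-- 'prefix, value = p.split(":", 1)' is ported by taking the first and second piece of the
-- split result (when ":" in p the split yields exactly two pieces, so this is exact there).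
def parse_tags_to_fields (tags : List String) : List (String × List String) :=
  let out : PySem.Dict String (List String) :=
    tags.foldl (fun out p =>
      if PySem.Str.isIn ":" p then
        let parts := (PySem.Str.splitMax? p ":" 1).getD []
        let pre := parts.headD ""
        let value := parts.tail.headD ""
        let field := (pvPrefixToField.get? (PySem.Str.upper (PySem.Str.strip pre))).getD pvDefaultField
        -- out.setdefault(field, []).append(value.strip())
        out.modify field [] (fun l => l ++ [PySem.Str.strip value])
      else
        out.modify pvDefaultField [] (fun l => l ++ [PySem.Str.strip p]))
      PySem.Dict.empty
  -- for k in list(out.keys()): out[k] = sorted(set(out[k]))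
  let out2 := out.keys.foldl (fun d k =>
      d.insert k (PySem.List.sorted (PySem.Set.ofList (d.getD k [])) (fun x => x) false)) out
  out2.items

-- ===== PORT B =====
def pvClassify (p : String) : String × String :=
  if PySem.Str.isIn ":" p then
    let parts := (PySem.Str.splitMax? p ":" 1).getD []
    ((pvPrefixToField.get? (PySem.Str.upper (PySem.Str.strip (parts.headD "")))).getD pvDefaultField,
     PySem.Str.strip (parts.tail.headD ""))
  else
    (pvDefaultField, PySem.Str.strip p)

def parse_tags_to_fields_alt (tags : List String) : List (String × List String) :=
  let pairs := tags.map pvClassify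
  (PySem.List.dedup (pairs.map (fun q => q.1))).map (fun f =>
    (f, PySem.List.sorted
          (PySem.Set.ofList ((pairs.filter (fun q => q.1 == f)).map (fun q => q.2)))
          (fun x => x) false))

-- ===== PRECONDITION & SPEC =====
def Spec_parse_tags_to_fields (tags : List String) (out : List (String × List String)) : Prop := out = parse_tags_to_fields_alt tags
instance (tags : List String) (out : List (String × List String)) : Decidable (Spec_parse_tags_to_fields tags out) := by unfold Spec_parse_tags_to_fields; infer_instance

-- ===== CLAIM (what is proved, stated in full; the proofs are below) =====
def Claim_equal_parse_tags_to_fields : Prop := ∀ (tags : List String), Dom_parse_tags_to_fields tags → Spec_parse_tags_to_fields tags (parse_tags_to_fields tags)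

-- ===== LEMMAS AND PROOFS =====

-- A's loop body computes exactly pvClassify's field/value pair.
theorem pvStepA_eq (out : PySem.Dict String (List String)) (p : String) :
    (if PySem.Str.isIn ":" p then
        let parts := (PySem.Str.splitMax? p ":" 1).getD []
        let pre := parts.headD ""
        let value := parts.tail.headD ""
        let field := (pvPrefixToField.get? (PySem.Str.upper (PySem.Str.strip pre))).getD pvDefaultField
        out.modify field [] (fun l => l ++ [PySem.Str.strip value])
      else
        out.modify pvDefaultField [] (fun l => l ++ [PySem.Str.strip p]))
    = out.modify (pvClassify p).1 [] (fun l => l ++ [(pvClassify p).2]) := by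
  by_cases h : PySem.Str.isIn ":" p = true
  · simp only [pvClassify, if_pos h]
  · simp only [pvClassify, if_neg h]

-- everything the update pass does, per key
theorem pvUpdatePass_getD (F : List String → List String)
    (ks : List String) (d : PySem.Dict String (List String)) (k : String)
    (hnd : ks.Nodup) :
    (ks.foldl (fun d k => d.insert k (F (d.getD k []))) d).getD k []
      = if k ∈ ks then F (d.getD k []) else d.getD k [] := by
  induction ks generalizing d with
  | nil => simp
  | cons k0 rest ih =>
    simp only [List.foldl_cons]
    rcases List.nodup_cons.mp hnd with ⟨hk0, hrest⟩
    rw [ih _ hrest]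
    by_cases hkk : k = k0
    · subst hkk
      simp [hk0]
    · simp [hkk, PySem.Dict.getD_insert]

theorem pvSet_update_self {α : Type} [BEq α] [LawfulBEq α]
    (xs : List α) (s : PySem.Set α) (h : ∀ x ∈ xs, x ∈ s) :
    PySem.Set.update s xs = s := by
  induction xs generalizing s with
  | nil => rfl
  | cons x xs ih =>
    have hx : PySem.Set.add s x = s := by
      have hm : x ∈ s := h x (by simp)
      simp [PySem.Set.add, PySem.Set.contains, hm]
    show PySem.Set.update (PySem.Set.add s x) xs = s
    rw [hx]
    exact ih s (fun y hy => h y (by simp [hy]))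

theorem parse_tags_to_fields_eq (tags : List String) :
    parse_tags_to_fields tags = parse_tags_to_fields_alt tags := by
  unfold parse_tags_to_fields parse_tags_to_fields_alt
  set pairs := tags.map pvClassify with hpairs
  set F : List String → List String :=
    fun l => PySem.List.sorted (PySem.Set.ofList l) (fun x => x) false with hF
  -- rewrite A's first loop as a fold over the classified pairs
  have hfold :
      tags.foldl (fun out p =>
        if PySem.Str.isIn ":" p then
          let parts := (PySem.Str.splitMax? p ":" 1).getD []
          let pre := parts.headD ""
          let value := parts.tail.headD ""
          let field := (pvPrefixToField.get? (PySem.Str.upper (PySem.Str.strip pre))).getD pvDefaultField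
          out.modify field [] (fun l => l ++ [PySem.Str.strip value])
        else
          out.modify pvDefaultField [] (fun l => l ++ [PySem.Str.strip p]))
        PySem.Dict.empty
      = pairs.foldl (fun d q => d.modify q.1 [] (fun l => l ++ [q.2])) PySem.Dict.empty := by
    rw [hpairs, List.foldl_map]
    exact PySem.List.foldl_congr_mem _ _ _ _ (fun d p _ => pvStepA_eq d p)
  rw [hfold]
  set out := pairs.foldl (fun d q => d.modify q.1 [] (fun l => l ++ [q.2])) PySem.Dict.empty with hout
  -- facts about the accumulated dict
  have hkeys : out.keys = PySem.Set.ofList (pairs.map (fun q => q.1)) := by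
    rw [hout]
    rw [PySem.Dict.keys_foldl_modify_key pairs (fun q => q.1) []
          (fun _ q => fun l => l ++ [q.2]) PySem.Dict.empty]
    simp [PySem.Set.update, PySem.Set.ofList_eq_foldl]
  have hnodup : out.keys.Nodup := by
    rw [hkeys]; exact PySem.Set.nodup_ofList _
  have hgetD : ∀ k, out.getD k [] = (pairs.filter (fun q => q.1 == k)).map (fun q => q.2) := by
    intro k
    rw [hout, PySem.Dict.getD_foldl_modify_append]
    simp
  -- the second loop rewrites every value in place
  set out2 := out.keys.foldl (fun d k => d.insert k (F (d.getD k []))) out with hout2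
  have hkeys2 : out2.keys = out.keys := by
    rw [hout2, PySem.Dict.keys_foldl_insert]
    exact pvSet_update_self out.keys out.keys (fun x hx => hx)
  have hnodup2 : out2.keys.Nodup := hkeys2 ▸ hnodup
  have hitems : out2.items = out2.keys.map (fun k => (k, out2.getD k [])) :=
    PySem.Dict.items_eq_map_keys out2 hnodup2 []
  rw [hitems, hkeys2]
  rw [hkeys, ← PySem.List.dedup_eq_ofList]
  apply List.map_congr_left
  intro k hk
  have hkmem : k ∈ out.keys := by
    rw [hkeys, ← PySem.List.dedup_eq_ofList]; exact hk
  have := pvUpdatePass_getD F out.keys out k hnodup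
  rw [hout2, this, if_pos hkmem, hgetD k]

-- ===== VERDICT (by name: the statement is the Claim_ definition above) =====
theorem parse_tags_to_fields_spec : Claim_equal_parse_tags_to_fields := by
  intro tags _
  exact parse_tags_to_fields_eq tags
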